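-- pv_equiv track=rewrite | github.com/suwon-algorithm-study/literate-meme | bin/main/dain/더맵게.py | solution
-- ===== SOURCE A (Python) =====
-- import heapq
--
-- def solution(scoville, K):
--     answer = 0
--     heapq.heapify(scoville)
--     while scoville:
--         tmp1 = heapq.heappop(scoville)
--         if tmp1 >= K:
--             return answer
--         if not scoville:
--             return -1
--         tmp2 = heapq.heappop(scoville)
--         heapq.heappush(scoville,tmp1+(tmp2*2))
--         answer += 1
-- ===== SOURCE B (Python) =====
-- def solution(scoville, K):
--     # Sort once, then run two FIFO queues: the sorted originals (index i)
--     # and the merged values (index j), which are produced in nondecreasing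
--     # order, so the overall minimum is always one of the two fronts.
--     base = sorted(scoville)
--     merged = []
--     i = j = 0
--     answer = 0
--
--     def pop_min():
--         nonlocal i, j
--         if i < len(base) and (j >= len(merged) or base[i] <= merged[j]):
--             i += 1
--             return base[i - 1]
--         if j < len(merged):
--             j += 1
--             return merged[j - 1]
--         return None
--
--     while True:
--         a = pop_min()
--         if a is None:
--             return None  # empty input, as in the original
--         if a >= K:
--             return answer
--         b = pop_min()
--         if b is None:
--             return -1
--         merged.append(a + 2 * b)
--         answer += 1
-- ===== Notes on version B (the rewrite author's own statement) =====
-- stated objective: faster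
-- what changed: Replaces the heap with a sort-once two-queue scheme: the sorted originals and a FIFO of merged values (which come out nondecreasing), so each step pops the global minimum by comparing the two queue fronts in O(1) instead of O(log n) heap sift operations.
-- outside the precondition, e.g. on solution([], 0): A returns None, B returns None
import Mathlib
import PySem

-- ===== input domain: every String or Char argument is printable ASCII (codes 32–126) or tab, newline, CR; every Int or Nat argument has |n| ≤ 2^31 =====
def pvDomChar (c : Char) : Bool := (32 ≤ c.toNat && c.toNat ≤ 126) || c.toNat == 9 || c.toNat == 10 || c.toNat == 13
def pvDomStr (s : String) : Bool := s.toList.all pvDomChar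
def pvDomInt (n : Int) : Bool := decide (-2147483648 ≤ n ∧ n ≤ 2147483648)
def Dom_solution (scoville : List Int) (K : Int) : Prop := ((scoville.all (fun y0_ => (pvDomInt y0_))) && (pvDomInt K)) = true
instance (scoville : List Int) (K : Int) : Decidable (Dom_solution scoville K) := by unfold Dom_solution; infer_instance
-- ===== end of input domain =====

-- B replaces A's heap with a sort-once two-queue scheme (sorted originals + FIFO of
-- merged values), popping the global minimum by comparing the two queue fronts.
-- NOTE: Python A heapifies (mutates) its `scoville` argument in place; B does not.
-- The equivalence proved here is about the return value only.

-- ===== PORT A =====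
-- heapq is modelled by its observable behaviour on the value multiset: heappop
-- removes and returns the minimum element (first occurrence), heappush adds an
-- element, heapify is the identity on the multiset.
def heapPop (h : List Int) : Option (Int × List Int) :=
  match PySem.List.min? h (fun x => x) with
  | none => none
  | some m => some (m, h.erase m)

theorem heapPop_length {h : List Int} {m : Int} {r : List Int}
    (hp : heapPop h = some (m, r)) : r.length + 1 = h.length := by
  unfold heapPop at hp
  cases hmin : PySem.List.min? h (fun x => x) with
  | none => simp [hmin] at hp
  | some m' =>
    have hm : m' ∈ h := PySem.List.min?_mem hmin
    simp [hmin] at hp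
    obtain ⟨rfl, rfl⟩ := hp
    exact List.length_erase_add_one hm

-- while scoville: pop tmp1; if tmp1 >= K return answer; if empty return -1;
-- pop tmp2; push tmp1+(tmp2*2); answer += 1.
-- Python falls off the end (returns None) only when the initial list is empty;
-- the port returns 0 there, outside Pre_solution.
def solutionLoop (h : List Int) (K ans : Int) : Int :=
  match hp : heapPop h with
  | none => 0
  | some (t1, r1) =>
    if t1 ≥ K then ans
    else
      match hp2 : heapPop r1 with
      | none => -1
      | some (t2, r2) => solutionLoop ((t1 + t2 * 2) :: r2) K (ans + 1)
termination_by h.length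
decreasing_by
  have h1 := heapPop_length hp
  have h2 := heapPop_length hp2
  simp only [List.length_cons]
  omega

def solution (scoville : List Int) (K : Int) : Int :=
  solutionLoop scoville K 0

-- ===== PORT B =====
-- pop_min of Source B: take the smaller front of the two queues (base preferred on
-- ties), returning the popped value and the two remaining queues.
def popQ (bs ms : List Int) : Option (Int × List Int × List Int) :=
  match bs, ms with
  | [], [] => none
  | b :: bt, [] => some (b, bt, [])
  | [], m :: mt => some (m, [], mt)
  | b :: bt, m :: mt => if b ≤ m then some (b, bt, m :: mt) else some (m, b :: bt, mt)

theorem popQ_length {bs ms bs1 ms1 : List Int} {a : Int}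
    (hp : popQ bs ms = some (a, bs1, ms1)) :
    bs1.length + ms1.length + 1 = bs.length + ms.length := by
  unfold popQ at hp
  match bs, ms with
  | [], [] => simp at hp
  | b :: bt, [] => simp_all
  | [], m :: mt => simp_all
  | b :: bt, m :: mt =>
    by_cases hbm : b ≤ m <;> simp_all <;> try omega

-- the while-True loop of Source B; `return None` on empty input is ported as 0,
-- outside Pre_solution.
def solutionAltLoop (bs ms : List Int) (K ans : Int) : Int :=
  match hp : popQ bs ms with
  | none => 0
  | some (a, bs1, ms1) =>
    if a ≥ K then ans
    else
      match hp2 : popQ bs1 ms1 with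
      | none => -1
      | some (b, bs2, ms2) => solutionAltLoop bs2 (ms2 ++ [a + 2 * b]) K (ans + 1)
termination_by bs.length + ms.length
decreasing_by
  have h1 := popQ_length hp
  have h2 := popQ_length hp2
  simp only [List.length_append, List.length_cons, List.length_nil]
  omega

def solution_alt (scoville : List Int) (K : Int) : Int :=
  solutionAltLoop (PySem.List.sorted scoville (fun x => x) false) [] K 0

-- ===== PRECONDITION & SPEC =====
-- Pre_ excludes only the empty list, on which Python A returns None, not an int.
def Pre_solution (scoville : List Int) (K : Int) : Prop := scoville ≠ []
instance (scoville : List Int) (K : Int) : Decidable (Pre_solution scoville K) := by unfold Pre_solution; infer_instance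
def pvWitness_solution : List Int × Int := ([1, 2, 3, 9, 10, 12], 7)

def Spec_solution (scoville : List Int) (K : Int) (out : Int) : Prop := out = solution_alt scoville K
instance (scoville : List Int) (K : Int) (out : Int) : Decidable (Spec_solution scoville K out) := by unfold Spec_solution; infer_instance

-- ===== CLAIM (what is proved, stated in full; the proofs are below) =====
def Claim_equal_solution : Prop := ∀ (scoville : List Int) (K : Int), Dom_solution scoville K → Pre_solution scoville K → Spec_solution scoville K (solution scoville K)

-- ===== LEMMAS AND PROOFS =====

-- canonical reference loop on the sorted multiset: pop the two leading minima,
-- insert the merged value back in order.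
def gLoop (l : List Int) (K ans : Int) : Int :=
  match l with
  | [] => 0
  | t1 :: r1 =>
    if t1 ≥ K then ans
    else
      match r1 with
      | [] => -1
      | t2 :: r2 => gLoop (r2.orderedInsert (· ≤ ·) (t1 + t2 * 2)) K (ans + 1)
termination_by l.length
decreasing_by
  simp [List.orderedInsert_length]

theorem min?_nil_int : PySem.List.min? ([] : List Int) (fun x => x) = none :=
  (PySem.List.min?_eq_none_iff _ _).mpr rfl

theorem solutionLoop_nil (K ans : Int) : solutionLoop [] K ans = 0 := by
  rw [solutionLoop]
  split
  · rfl
  · rename_i t1 r1 hp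
    unfold heapPop at hp
    rw [min?_nil_int] at hp
    exact absurd hp (by simp)

theorem gLoop_nil (K ans : Int) : gLoop [] K ans = 0 := by
  rw [gLoop]

theorem loopA_eq_gLoop (n : ℕ) :
    ∀ (h l : List Int) (K ans : Int), h.length ≤ n → h.Perm l →
      l.Pairwise (· ≤ ·) → solutionLoop h K ans = gLoop l K ans := by
  induction n with
  | zero =>
    intro h l K ans hlen hperm hsort
    have hh : h = [] := List.length_eq_zero_iff.mp (Nat.le_zero.mp hlen)
    subst hh
    have hl : l = [] := hperm.symm.eq_nil
    subst hl
    rw [solutionLoop_nil, gLoop_nil]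
  | succ n ih =>
    intro h l K ans hlen hperm hsort
    rw [solutionLoop]
    split
    · -- heapPop h = none : h = []
      rename_i hp
      unfold heapPop at hp
      cases hmin : PySem.List.min? h (fun x => x) with
      | none =>
        have hh : h = [] := (PySem.List.min?_eq_none_iff _ _).mp hmin
        subst hh
        have hl : l = [] := hperm.symm.eq_nil
        subst hl
        rw [gLoop]
      | some m => rw [hmin] at hp; simp at hp
    · rename_i m r1' hp
      -- first pop: m is the minimum of h
      unfold heapPop at hp
      cases hmin : PySem.List.min? h (fun x => x) with
      | none => rw [hmin] at hp; simp at hp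
      | some m =>
        rw [hmin] at hp
        simp at hp
        obtain ⟨rfl, rfl⟩ := hp
        -- l is nonempty
        cases l with
        | nil =>
          rw [hperm.eq_nil, min?_nil_int] at hmin
          exact absurd hmin (by simp)
        | cons t1 r1 =>
          have hmem : m ∈ h := PySem.List.min?_mem hmin
          have hminle : ∀ y ∈ h, m ≤ y := fun y hy => PySem.List.min?_isMin hmin y hy
          have hheadle : ∀ y ∈ t1 :: r1, t1 ≤ y := by
            intro y hy
            rcases List.mem_cons.mp hy with rfl | hy'
            · exact le_rfl
            · exact (List.pairwise_cons.mp hsort).1 y hy'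
          have ht1 : m = t1 :=
            le_antisymm (hminle t1 (hperm.mem_iff.mpr (List.mem_cons_self)))
              (hheadle m (hperm.mem_iff.mp hmem))
          subst ht1
          have hperm1 : (h.erase m).Perm r1 := by
            have := hperm.erase m
            simpa using this
          rw [gLoop.eq_def]
          by_cases hK : m ≥ K
          · simp [hK]
          · simp only [hK, if_false]
            split
            · -- heapPop (h.erase m) = none : the rest is empty
              rename_i hp2
              unfold heapPop at hp2
              cases hmin2 : PySem.List.min? (h.erase m) (fun x => x) with
              | none =>
                have : h.erase m = [] := (PySem.List.min?_eq_none_iff _ _).mp hmin2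
                have hr1 : r1 = [] := (this ▸ hperm1).symm.eq_nil
                subst hr1
                rfl
              | some m2 => rw [hmin2] at hp2; simp at hp2
            · rename_i t2' r2' hp2
              unfold heapPop at hp2
              cases hmin2 : PySem.List.min? (h.erase m) (fun x => x) with
              | none => rw [hmin2] at hp2; simp at hp2
              | some m2 =>
                rw [hmin2] at hp2
                simp at hp2
                obtain ⟨rfl, rfl⟩ := hp2
                cases r1 with
                | nil =>
                  rw [hperm1.eq_nil, min?_nil_int] at hmin2
                  exact absurd hmin2 (by simp)
                | cons t2 r2 =>
                  have hsort1 : (t2 :: r2).Pairwise (· ≤ ·) := (List.pairwise_cons.mp hsort).2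
                  have hmem2 : m2 ∈ h.erase m := PySem.List.min?_mem hmin2
                  have hminle2 : ∀ y ∈ h.erase m, m2 ≤ y := fun y hy => PySem.List.min?_isMin hmin2 y hy
                  have hheadle2 : ∀ y ∈ t2 :: r2, t2 ≤ y := by
                    intro y hy
                    rcases List.mem_cons.mp hy with rfl | hy'
                    · exact le_rfl
                    · exact (List.pairwise_cons.mp hsort1).1 y hy'
                  have ht2 : m2 = t2 :=
                    le_antisymm (hminle2 t2 (hperm1.mem_iff.mpr (List.mem_cons_self)))
                      (hheadle2 m2 (hperm1.mem_iff.mp hmem2))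
                  subst ht2
                  have hperm2 : ((h.erase m).erase m2).Perm r2 := by
                    have := hperm1.erase m2
                    simpa using this
                  -- apply the induction hypothesis
                  have hlen2 : ((m + m2 * 2) :: (h.erase m).erase m2).length ≤ n := by
                    have e1 : (h.erase m).length + 1 = h.length := List.length_erase_add_one hmem
                    have e2 : ((h.erase m).erase m2).length + 1 = (h.erase m).length :=
                      List.length_erase_add_one hmem2
                    simp only [List.length_cons]
                    omega
                  have hpermI : ((m + m2 * 2) :: (h.erase m).erase m2).Perm
                      (r2.orderedInsert (· ≤ ·) (m + m2 * 2)) :=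
                    ((hperm2.cons _).trans (List.perm_orderedInsert _ _ _).symm)
                  have hsortI : (r2.orderedInsert (· ≤ ·) (m + m2 * 2)).Pairwise (· ≤ ·) :=
                    List.Pairwise.orderedInsert _ _ (List.pairwise_cons.mp hsort1).2
                  exact ih _ _ K (ans + 1) hlen2 hpermI hsortI

def goodW (bs : List Int) (ws : List (Int × Int)) : Prop :=
  (∀ p ∈ ws, p.1 ≤ p.2 ∧ ∀ x ∈ bs, p.2 ≤ x) ∧
  ws.Pairwise (fun p q => p.2 ≤ q.1 ∧ p.2 ≤ q.2 ∧ q.2 ≤ p.1 + 2 * p.2)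

def wval (p : Int × Int) : Int := p.1 + 2 * p.2

theorem headLe {x : Int} {xs : List Int} (h : (x :: xs).Pairwise (· ≤ ·)) :
    ∀ y ∈ x :: xs, x ≤ y := by
  intro y hy
  rcases List.mem_cons.mp hy with rfl | hy'
  · exact le_rfl
  · exact (List.pairwise_cons.mp h).1 y hy'

theorem popQ_none {bs ms : List Int} (hp : popQ bs ms = none) : bs = [] ∧ ms = [] := by
  unfold popQ at hp
  match bs, ms with
  | [], [] => exact ⟨rfl, rfl⟩
  | b :: bt, [] => simp at hp
  | [], m :: mt => simp at hp
  | b :: bt, m :: mt => by_cases hbm : b ≤ m <;> simp [hbm] at hp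

theorem popQ_cases {bs ms bs1 ms1 : List Int} {a : Int}
    (hp : popQ bs ms = some (a, bs1, ms1)) :
    (bs = a :: bs1 ∧ ms1 = ms) ∨ (ms = a :: ms1 ∧ bs1 = bs) := by
  unfold popQ at hp
  match bs, ms with
  | [], [] => simp at hp
  | b :: bt, [] => simp at hp; obtain ⟨rfl, rfl, rfl⟩ := hp; left; exact ⟨rfl, rfl⟩
  | [], m :: mt => simp at hp; obtain ⟨rfl, rfl, rfl⟩ := hp; right; exact ⟨rfl, rfl⟩
  | b :: bt, m :: mt =>
    by_cases hbm : b ≤ m <;> simp [hbm] at hp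
    · obtain ⟨rfl, rfl, rfl⟩ := hp; left; exact ⟨rfl, rfl⟩
    · obtain ⟨rfl, rfl, rfl⟩ := hp; right; exact ⟨rfl, rfl⟩

theorem popQ_min {bs ms bs1 ms1 : List Int} {a : Int}
    (hb : bs.Pairwise (· ≤ ·)) (hm : ms.Pairwise (· ≤ ·))
    (hp : popQ bs ms = some (a, bs1, ms1)) : ∀ x ∈ bs ++ ms, a ≤ x := by
  unfold popQ at hp
  match bs, ms with
  | [], [] => simp at hp
  | b :: bt, [] =>
    simp at hp; obtain ⟨rfl, rfl, rfl⟩ := hp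
    simpa using headLe hb
  | [], m :: mt =>
    simp at hp; obtain ⟨rfl, rfl, rfl⟩ := hp
    simpa using headLe hm
  | b :: bt, m :: mt =>
    by_cases hbm : b ≤ m <;> simp [hbm] at hp <;> obtain ⟨rfl, rfl, rfl⟩ := hp <;>
      intro x hx <;> rcases List.mem_append.mp hx with hx' | hx'
    · exact headLe hb x hx'
    · exact le_trans hbm (headLe hm x hx')
    · exact le_trans (le_of_lt (lt_of_not_ge hbm)) (headLe hb x hx')
    · exact headLe hm x hx'

theorem popQ_perm {bs ms bs1 ms1 : List Int} {a : Int}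
    (hp : popQ bs ms = some (a, bs1, ms1)) : (a :: (bs1 ++ ms1)).Perm (bs ++ ms) := by
  rcases popQ_cases hp with ⟨rfl, rfl⟩ | ⟨rfl, rfl⟩
  · rfl
  · exact List.perm_middle.symm

theorem goodW_tailB {x : Int} {bs : List Int} {ws : List (Int × Int)}
    (h : goodW (x :: bs) ws) : goodW bs ws := by
  refine ⟨fun p hp => ⟨(h.1 p hp).1, fun y hy => (h.1 p hp).2 y (List.mem_cons_of_mem _ hy)⟩, h.2⟩

theorem goodW_tailW {p : Int × Int} {bs : List Int} {ws : List (Int × Int)}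
    (h : goodW bs (p :: ws)) : goodW bs ws :=
  ⟨fun q hq => h.1 q (List.mem_cons_of_mem _ hq), (List.pairwise_cons.mp h.2).2⟩

theorem goodW_sorted {bs : List Int} {ws : List (Int × Int)} (h : goodW bs ws) :
    (ws.map wval).Pairwise (· ≤ ·) := by
  rw [List.pairwise_map]
  refine h.2.imp_of_mem ?_
  intro p q hp _ ⟨h1, h2, h3⟩
  have hpp : p.1 ≤ p.2 := (h.1 p hp).1
  unfold wval
  omega

theorem solutionAltLoop_nil (K ans : Int) : solutionAltLoop [] [] K ans = 0 := by
  rw [solutionAltLoop]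
  split
  · rfl
  · rename_i a bs1 ms1 hp
    exact absurd hp (by rw [show popQ [] [] = none from rfl]; simp)

theorem popQ_step {bs : List Int} {ws : List (Int × Int)} {a : Int} {bs1 ms1 : List Int}
    (hsb : bs.Pairwise (· ≤ ·)) (hgw : goodW bs ws)
    (hp : popQ bs (ws.map wval) = some (a, bs1, ms1)) :
    ∃ ws1, ms1 = ws1.map wval ∧ goodW bs1 ws1 ∧ bs1.Pairwise (· ≤ ·) ∧
      (∀ p ∈ ws1, p.2 ≤ a) ∧ ws1.Sublist ws := by
  rcases popQ_cases hp with ⟨hbsE, hmsE⟩ | ⟨hmsE, hbsE⟩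
  · refine ⟨ws, hmsE, goodW_tailB (hbsE ▸ hgw), (List.pairwise_cons.mp (hbsE ▸ hsb)).2,
      ?_, List.Sublist.refl ws⟩
    intro p hp'
    exact (hgw.1 p hp').2 a (hbsE ▸ List.mem_cons_self)
  · cases ws with
    | nil => simp at hmsE
    | cons p0 ws' =>
      simp only [List.map_cons, List.cons.injEq] at hmsE
      obtain ⟨hval0, hms1⟩ := hmsE
      refine ⟨ws', hms1.symm, hbsE ▸ goodW_tailW hgw, hbsE ▸ hsb, ?_, List.sublist_cons_self p0 ws'⟩
      intro p hp'
      have := (List.pairwise_cons.mp hgw.2).1 p hp'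
      rw [← hval0]
      exact this.2.2

theorem loopB_eq_gLoop (n : ℕ) :
    ∀ (bs : List Int) (ws : List (Int × Int)) (l : List Int) (K ans : Int),
      bs.length + ws.length ≤ n → bs.Pairwise (· ≤ ·) → goodW bs ws →
      l.Perm (bs ++ ws.map wval) → l.Pairwise (· ≤ ·) →
      solutionAltLoop bs (ws.map wval) K ans = gLoop l K ans := by
  induction n with
  | zero =>
    intro bs ws l K ans hlen hsb hgw hperm hsort
    have hbs : bs = [] := List.length_eq_zero_iff.mp (by omega)
    have hws : ws = [] := List.length_eq_zero_iff.mp (by omega)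
    subst hbs; subst hws
    have hl : l = [] := by simpa using hperm
    subst hl
    rw [show List.map wval [] = ([] : List Int) from rfl, solutionAltLoop_nil, gLoop_nil]
  | succ n ih =>
    intro bs ws l K ans hlen hsb hgw hperm hsort
    rw [solutionAltLoop]
    split
    · rename_i hp
      obtain ⟨hbs, hms⟩ := popQ_none hp
      subst hbs
      have hws : ws = [] := List.map_eq_nil_iff.mp hms
      subst hws
      have hl : l = [] := by simpa using hperm
      rw [hl, gLoop_nil]
    · rename_i a bs1 ms1 hp
      have hmsort := goodW_sorted hgw
      cases l with
      | nil =>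
        have hnil : bs ++ ws.map wval = [] := hperm.symm.eq_nil
        rw [List.append_eq_nil_iff] at hnil
        rw [hnil.1, hnil.2] at hp
        rw [show popQ [] [] = none from rfl] at hp
        exact absurd hp (by simp)
      | cons t1 r1 =>
        have hmin := popQ_min hsb hmsort hp
        have hpermQ := popQ_perm hp
        have haInL : a ∈ t1 :: r1 :=
          hperm.mem_iff.mpr (hpermQ.subset List.mem_cons_self)
        have ht1 : a = t1 :=
          le_antisymm (hmin t1 (hperm.mem_iff.mp List.mem_cons_self)) (headLe hsort a haInL)
        subst ht1
        obtain ⟨ws1, hms1, hgw1, hsb1, hle1, hsub1⟩ := popQ_step hsb hgw hp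
        have hpermR : r1.Perm (bs1 ++ ms1) :=
          ((hperm.trans hpermQ.symm).cons_inv)
        by_cases hK : a ≥ K
        · rw [gLoop.eq_def]; simp [hK]
        · rw [gLoop.eq_def]; simp only [hK, if_false]
          subst hms1
          split
          · -- second pop fails: nothing is left
            rename_i hp2
            obtain ⟨hbs1, hms1'⟩ := popQ_none hp2
            have hr1 : r1 = [] := by
              have := hpermR
              rw [hbs1, hms1'] at this
              simpa using this.eq_nil
            subst hr1
            rfl
          · rename_i b bs2 ms2 hp2
            have hmsort1 := goodW_sorted hgw1
            cases r1 with
            | nil =>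
              have hnil : bs1 ++ ws1.map wval = [] := hpermR.symm.eq_nil
              rw [List.append_eq_nil_iff] at hnil
              rw [hnil.1, hnil.2] at hp2
              rw [show popQ [] [] = none from rfl] at hp2
              exact absurd hp2 (by simp)
            | cons t2 r2 =>
              have hmin2 := popQ_min hsb1 hmsort1 hp2
              have hpermQ2 := popQ_perm hp2
              have hbInR : b ∈ t2 :: r2 :=
                hpermR.mem_iff.mpr (hpermQ2.subset List.mem_cons_self)
              have hsort1 : (t2 :: r2).Pairwise (· ≤ ·) := (List.pairwise_cons.mp hsort).2
              have ht2 : b = t2 :=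
                le_antisymm (hmin2 t2 (hpermR.mem_iff.mp List.mem_cons_self))
                  (headLe hsort1 b hbInR)
              subst ht2
              obtain ⟨ws2, hms2, hgw2, hsb2, hle2, hsub2⟩ := popQ_step hsb1 hgw1 hp2
              subst hms2
              have hpermR2 : r2.Perm (bs2 ++ ws2.map wval) :=
                ((hpermR.trans hpermQ2.symm).cons_inv)
              -- everything remaining is at least b
              have hgeb : ∀ x ∈ bs2 ++ ws2.map wval, b ≤ x := by
                intro x hx
                exact hmin2 x (hpermQ2.subset (List.mem_cons_of_mem _ hx))
              -- a ≤ b since a is the head of the sorted l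
              have hab : a ≤ b := (List.pairwise_cons.mp hsort).1 b hbInR
              -- the new witness list
              have hgwNew : goodW bs2 (ws2 ++ [(a, b)]) := by
                constructor
                · intro p hp'
                  rcases List.mem_append.mp hp' with hmem | hmem
                  · exact hgw2.1 p hmem
                  · simp at hmem
                    subst hmem
                    exact ⟨hab, fun x hx => hgeb x (List.mem_append_left _ hx)⟩
                · rw [List.pairwise_append]
                  refine ⟨hgw2.2, List.pairwise_singleton _ _, ?_⟩
                  intro p hpmem q hqmem
                  simp at hqmem
                  subst hqmem
                  refine ⟨hle1 p (hsub2.subset hpmem), hle2 p hpmem, ?_⟩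
                  exact hgeb (wval p) (List.mem_append_right _ (List.mem_map_of_mem hpmem))
              -- lengths
              have hlenQ1 := popQ_length hp
              have hlenQ2 := popQ_length hp2
              have hlenNew : bs2.length + (ws2 ++ [(a, b)]).length ≤ n := by
                simp only [List.length_append, List.length_map, List.length_cons,
                  List.length_nil] at *
                omega
              -- the merged value
              have hval : (a + 2 * b) = (a + b * 2) := by ring
              have hmapNew : (ws2 ++ [(a, b)]).map wval
                  = ws2.map wval ++ [a + 2 * b] := by
                simp [wval]
              have hpermNew : (r2.orderedInsert (· ≤ ·) (a + b * 2)).Perm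
                  (bs2 ++ (ws2 ++ [(a, b)]).map wval) := by
                refine (List.perm_orderedInsert _ _ _).trans ?_
                rw [hmapNew, ← hval]
                exact (hpermR2.cons _).trans (List.perm_middle.symm.trans
                  (List.Perm.append_left _ (List.perm_append_singleton _ _).symm))
              have hsortNew : (r2.orderedInsert (· ≤ ·) (a + b * 2)).Pairwise (· ≤ ·) :=
                List.Pairwise.orderedInsert _ _ (List.pairwise_cons.mp hsort1).2
              have := ih bs2 (ws2 ++ [(a, b)]) (r2.orderedInsert (· ≤ ·) (a + b * 2))
                K (ans + 1) hlenNew hsb2 hgwNew hpermNew hsortNew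
              rw [hmapNew] at this
              exact this

-- ===== VERDICT (by name: the statement is the Claim_ definition above) =====
theorem solution_spec : Claim_equal_solution := by
  intro scoville K _ _
  unfold Spec_solution solution solution_alt
  have hperm : (PySem.List.sorted scoville (fun x => x) false).Perm scoville :=
    PySem.List.sorted_perm _ _ _
  have hsorted : (PySem.List.sorted scoville (fun x => x) false).Pairwise (· ≤ ·) :=
    PySem.List.sorted_pairwise (xs := scoville) (key := fun x => x)
  rw [loopA_eq_gLoop scoville.length scoville _ K 0 le_rfl hperm.symm hsorted]
  exact (loopB_eq_gLoop (PySem.List.sorted scoville (fun x => x) false).length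
      (PySem.List.sorted scoville (fun x => x) false) [] _ K 0 (by simp) hsorted
      ⟨by simp, List.Pairwise.nil⟩ (by simp) hsorted).symm
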